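-- pv_equiv track=rewrite | github.com/PauloBacelar/unicamp | 1º Semestre/MC102 - Algoritmos e Programação de Computadores/lab06/lab06.py | correlacao_cruzada
-- ===== SOURCE A (Python) =====
-- def correlacao_cruzada(vetor: list[int], mascara: list[int]) -> list[int]:
--     '''
--     Percorre uma máscara calculando o produto interno em outr vetor.
--
--     Retorna um vetor com o resultado de cada conjunto de multiplicações.
--
--     Parâmetros:\n
--     mascara -- vetor menor que percorrerá o vetor maior\n
--     vetor -- vetor maior que será percorrido pela máscara
--     '''
--
--     novo_vetor = []
--
--     # Fórmula do nº de elementos é (n - k + 1)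
--     # Em que n e k são os tamanhos do vetor e da máscara, respectivamente
--     for i in range(len(vetor) - len(mascara) + 1):
--         soma = 0
--
--         # O índice do elemento do vetor a ser multiplicado pela máscara é i + j
--         # Em que j vai de 0 a k - 1
--         for j in range(len(mascara)):
--             soma += vetor[i + j] * mascara[j]
--
--         # Adicionando o resultado da soma a novo_vetor e indo para o próximo i
--         novo_vetor.append(soma)
--
--     return novo_vetor
-- ===== SOURCE B (Python) =====
-- def correlacao_cruzada(vetor: list[int], mascara: list[int]) -> list[int]:
--     # Horner scheme over the mask: corr(v, m0::ms) = [m0*v[i] + corr(v[1:], ms)[i]],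
--     # realised bottom-up: start from the all-zero base result and fold the mask taps
--     # back-to-front, each stage building a NEW list by zipping the tap's window of the
--     # vector (starting at j, as long as the current result) with the previous stage's
--     # result (zip truncation yields the right lengths, including the empty result when
--     # the mask is longer than the vector).
--     res = [0] * (max(0, len(vetor) - len(mascara)) + 1)
--     for j in range(len(mascara) - 1, -1, -1):
--         mj = mascara[j]
--         res = [mj * v + r for v, r in zip(vetor[j:j + len(res)], res)]
--     return res
-- ===== Notes on version B (the rewrite author's own statement) =====
-- stated objective: alternative
-- what changed: Replaces A's per-position inner products with a Horner scheme on the mask: starting from an all-zero base result, the mask taps are folded back-to-front, each stage building a new list by zipping the tap's window of the vector with the previous stage's result (corr(v, m0::ms) = m0*v + corr(v[1:], ms) pointwise), lengths falling out of zip truncation instead of the n-k+1 formula.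
import Mathlib
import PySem

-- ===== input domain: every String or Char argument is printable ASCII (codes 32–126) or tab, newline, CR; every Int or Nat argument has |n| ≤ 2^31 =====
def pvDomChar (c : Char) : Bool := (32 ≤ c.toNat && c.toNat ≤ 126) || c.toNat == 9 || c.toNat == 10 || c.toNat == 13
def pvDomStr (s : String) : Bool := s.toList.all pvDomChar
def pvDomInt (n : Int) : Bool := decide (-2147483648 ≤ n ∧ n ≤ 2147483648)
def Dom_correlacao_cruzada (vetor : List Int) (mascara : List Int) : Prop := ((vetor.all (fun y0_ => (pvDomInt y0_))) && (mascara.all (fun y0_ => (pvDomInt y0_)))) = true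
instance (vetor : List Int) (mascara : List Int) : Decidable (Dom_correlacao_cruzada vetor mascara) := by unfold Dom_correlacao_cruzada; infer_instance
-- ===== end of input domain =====

-- B replaces A's per-position inner product with a Horner scheme on the mask (taps
-- folded back-to-front, each stage zipping a vector suffix with the previous result);
-- same result, same O(n*k) cost.


-- ===== PORT A =====
-- vetor[i + j] / mascara[j] are always in range inside A's loops (0 ≤ i ≤ n-k, 0 ≤ j < k),
-- so pyGetD with default 0 is exact here (A never raises).
def correlacao_cruzada (vetor : List Int) (mascara : List Int) : List Int :=
  (PySem.List.pyRange 0 ((vetor.length : Int) - (mascara.length : Int) + 1) 1).foldl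
    (fun novo_vetor i =>
      novo_vetor ++
        [(PySem.List.pyRange 0 (mascara.length : Int) 1).foldl
          (fun soma j =>
            soma + PySem.List.pyGetD vetor (i + j) 0 * PySem.List.pyGetD mascara j 0) 0]) []

-- ===== PORT B =====
-- Horner scheme: res starts as the all-zero base result; for j = k-1 down to 0
-- res = [mascara[j]*v + r for v, r in zip(vetor[j:j+len(res)], res)].
def correlacao_cruzada_alt (vetor : List Int) (mascara : List Int) : List Int :=
  (PySem.List.pyRange ((mascara.length : Int) - 1) (-1) (-1)).foldl
    (fun res j =>
      let mj := PySem.List.pyGetD mascara j 0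
      ((PySem.List.slice vetor (some j) (some (j + (res.length : Int)))).zip res).map
        (fun p => mj * p.1 + p.2))
    (List.replicate ((max 0 ((vetor.length : Int) - (mascara.length : Int))).toNat + 1) 0)

-- ===== PRECONDITION & SPEC =====
def Spec_correlacao_cruzada (vetor : List Int) (mascara : List Int) (out : List Int) : Prop := out = correlacao_cruzada_alt vetor mascara
instance (vetor : List Int) (mascara : List Int) (out : List Int) : Decidable (Spec_correlacao_cruzada vetor mascara out) := by unfold Spec_correlacao_cruzada; infer_instance

-- ===== CLAIM (what is proved, stated in full; the proofs are below) =====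
def Claim_equal_correlacao_cruzada : Prop := ∀ (vetor : List Int) (mascara : List Int), Dom_correlacao_cruzada vetor mascara → Spec_correlacao_cruzada vetor mascara (correlacao_cruzada vetor mascara)

-- ===== LEMMAS AND PROOFS =====

-- The common closed form: output position i carries the inner product of the mask
-- with the vector window starting at i.
def pvS (v : List Int) (m : List Int) : List Int :=
  (List.range ((v.length + 1) - m.length)).map (fun i =>
    ((List.range m.length).map (fun j => v.getD (i + j) 0 * m.getD j 0)).sum)

theorem pv_getD_drop (l : List Int) (n i : Nat) (d : Int) :
    (l.drop n).getD i d = l.getD (n + i) d := by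
  simp [List.getD_eq_getElem?_getD, List.getElem?_drop]

theorem pv_zip_take (l r : List Int) : (l.take r.length).zip r = l.zip r := by
  induction l generalizing r with
  | nil => simp
  | cons a l ih =>
      cases r with
      | nil => simp
      | cons b r => simp [ih]

theorem pv_A_eq_S (v m : List Int) : correlacao_cruzada v m = pvS v m := by
  unfold correlacao_cruzada pvS
  rw [PySem.List.foldl_append_singleton_eq_map,
      PySem.List.pyRange_one 0 ((v.length : Int) - (m.length : Int) + 1)]
  have hN : (((v.length : Int) - (m.length : Int) + 1) - 0).toNat = (v.length + 1) - m.length := by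
    omega
  rw [hN, List.map_map, List.nil_append]
  apply List.map_congr_left
  intro i _
  simp only [Function.comp_apply, zero_add]
  rw [PySem.List.foldl_add, zero_add, PySem.List.pyRange_one 0 (m.length : Int)]
  have hk : (((m.length : Int)) - 0).toNat = m.length := by omega
  rw [hk, List.map_map]
  apply congrArg List.sum
  apply List.map_congr_left
  intro j _
  simp only [Function.comp_apply, zero_add]
  rw [show (i : Int) + (j : Int) = ((i + j : Nat) : Int) by push_cast; ring,
      PySem.List.pyGetD_natCast, PySem.List.pyGetD_natCast]

theorem pv_S_nil (v : List Int) : pvS v [] = List.replicate (v.length + 1) 0 := by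
  simp [pvS, List.map_const']

theorem pv_S_cons (v : List Int) (m0 : Int) (ms : List Int) :
    pvS v (m0 :: ms) = ((v.zip (pvS (v.drop 1) ms)).map (fun p => p.1 * m0 + p.2)) := by
  apply List.ext_getElem
  · simp [pvS]
    omega
  · intro i h1 h2
    have hv : i < v.length := by
      simp only [List.length_map, List.length_zip] at h2
      omega
    simp only [pvS, List.getElem_map, List.getElem_range, List.getElem_zip]
    rw [show (m0 :: ms).length = ms.length + 1 from rfl, List.range_succ_eq_map]
    simp only [List.map_cons, List.map_map, List.sum_cons]
    congr 1
    · simp [List.getD_eq_getElem?_getD, List.getElem?_eq_getElem hv]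
    · apply congrArg List.sum
      apply List.map_congr_left
      intro j _
      simp only [Function.comp_apply, Nat.succ_eq_add_one, List.getD_cons_succ]
      rw [pv_getD_drop, show i + (j + 1) = 1 + (i + j) from by omega]

theorem pv_alt_nil (v : List Int) :
    correlacao_cruzada_alt v [] = List.replicate (v.length + 1) 0 := by
  unfold correlacao_cruzada_alt
  rw [show ((([] : List Int).length : Int) - 1) = (-1 : Int) by simp,
      PySem.List.pyRange_neg_one_eq_nil (le_refl (-1 : Int))]
  simp only [List.foldl_nil, List.length_nil, Nat.cast_zero, Int.sub_zero]
  have h : (max 0 (v.length : Int)).toNat + 1 = v.length + 1 := by omega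
  rw [h]

theorem pv_alt_cons (v : List Int) (m0 : Int) (ms : List Int) :
    correlacao_cruzada_alt v (m0 :: ms) =
      ((v.zip (correlacao_cruzada_alt (v.drop 1) ms)).map (fun p => m0 * p.1 + p.2)) := by
  unfold correlacao_cruzada_alt
  have h1 : PySem.List.pyRange (((m0 :: ms).length : Int) - 1) (-1) (-1)
      = (List.range (ms.length + 1)).map (fun t : Nat => ((m0 :: ms).length : Int) - 1 - (t : Int)) := by
    rw [PySem.List.pyRange_neg_one,
        show (((((m0 :: ms).length : Int)) - 1) - (-1)).toNat = ms.length + 1 by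
          simp only [List.length_cons]; omega]
  have h2 : PySem.List.pyRange (((ms).length : Int) - 1) (-1) (-1)
      = (List.range ms.length).map (fun t : Nat => ((ms).length : Int) - 1 - (t : Int)) := by
    rw [PySem.List.pyRange_neg_one,
        show ((((ms.length : Int)) - 1) - (-1)).toNat = ms.length by omega]
  rw [h1, h2, List.foldl_map, List.foldl_map, List.range_succ, List.foldl_append,
      List.foldl_cons, List.foldl_nil]
  have hz : (((m0 :: ms).length : Int)) - 1 - (ms.length : Int) = 0 := by
    simp only [List.length_cons]
    push_cast
    ring
  rw [hz]
  simp only [zero_add, PySem.List.slice_zero_start, PySem.List.slice_to_natCast,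
    PySem.List.pyGetD_zero_cons, pv_zip_take]
  congr 1
  -- the first ms.length stages coincide (index shifted by one, vector suffix shifted by one)
  have hinit : List.replicate ((max 0 ((v.length : Int) - ((m0 :: ms).length : Int))).toNat + 1) (0 : Int)
      = List.replicate ((max 0 (((v.drop 1).length : Int) - ((ms).length : Int))).toNat + 1) (0 : Int) := by
    congr 1
    simp only [List.length_cons, List.length_drop]
    omega
  rw [hinit]
  congr 1
  apply PySem.List.foldl_congr_mem
  intro acc t ht
  have htk : t < ms.length := List.mem_range.mp ht
  have hj1 : (((m0 :: ms).length : Int)) - 1 - (t : Int) = (((ms.length - 1 - t) + 1 : Nat) : Int) := by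
    simp only [List.length_cons]
    push_cast
    omega
  have hj2 : ((ms.length : Int)) - 1 - (t : Int) = (((ms.length - 1 - t) : Nat) : Int) := by
    omega
  rw [hj1, hj2, PySem.List.pyGetD_natCast, PySem.List.pyGetD_natCast,
      PySem.List.slice_natCast_add, PySem.List.slice_natCast_add,
      List.drop_drop, pv_zip_take, pv_zip_take]
  rw [show (1 : Nat) + (ms.length - 1 - t) = (ms.length - 1 - t) + 1 from by omega]
  simp

theorem pv_alt_eq_S (m : List Int) : ∀ v : List Int, correlacao_cruzada_alt v m = pvS v m := by
  induction m with
  | nil => intro v; rw [pv_alt_nil, pv_S_nil]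
  | cons m0 ms ih =>
      intro v
      rw [pv_alt_cons, ih, pv_S_cons]
      apply List.map_congr_left
      intro p _
      ring

-- ===== VERDICT (by name: the statement is the Claim_ definition above) =====
theorem correlacao_cruzada_spec : Claim_equal_correlacao_cruzada := by
  intro vetor mascara _
  unfold Spec_correlacao_cruzada
  rw [pv_A_eq_S, pv_alt_eq_S]
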